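-- pv_equiv track=rewrite | github.com/khetansarvesh/msml_602 | src/preprocess.py | _get_length_distribution
-- ===== SOURCE A (Python) =====
-- from typing import Dict, List, Tuple, Optional
-- from collections import Counter
--
-- def _get_length_distribution(lengths: List[int]) -> Dict:
--     """
--     Get distribution of sequence lengths in bins.
--
--     Args:
--         lengths (List[int]): List of sequence lengths
--
--     Returns:
--         Dict: Length distribution statistics
--     """
--     length_counts = Counter(lengths)
--
--     # Create bins for common sequence lengths
--     bins = {
--         "0-10": 0,
--         "11-25": 0,
--         "26-50": 0,
--         "51-100": 0,
--         "101-200": 0,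
--         "201-500": 0,
--         "500+": 0
--     }
--
--     for length in lengths:
--         if length <= 10:
--             bins["0-10"] += 1
--         elif length <= 25:
--             bins["11-25"] += 1
--         elif length <= 50:
--             bins["26-50"] += 1
--         elif length <= 100:
--             bins["51-100"] += 1
--         elif length <= 200:
--             bins["101-200"] += 1
--         elif length <= 500:
--             bins["201-500"] += 1
--         else:
--             bins["500+"] += 1
--
--     return bins
-- ===== SOURCE B (Python) =====
-- from typing import Dict, List
--
--
-- def _get_length_distribution(lengths: List[int]) -> Dict:
--     # Staged passes: count how many lengths fall at or below each boundary
--     # (cumulative counts), then each bin is the difference of adjacent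
--     # cumulative counts; the last bin is the remainder above 500.
--     boundaries = [10, 25, 50, 100, 200, 500]
--     keys = ["0-10", "11-25", "26-50", "51-100", "101-200", "201-500", "500+"]
--     cum = [sum(1 for x in lengths if x <= b) for b in boundaries] + [len(lengths)]
--     return dict(zip(keys, [c - p for p, c in zip([0] + cum, cum)]))
-- ===== Notes on version B (the rewrite author's own statement) =====
-- stated objective: alternative
-- what changed: Instead of a single pass dispatching each element into a bucket via the if/elif chain, B makes one counting pass per boundary (how many lengths are <= it), takes adjacent differences of these cumulative counts to get the bin sizes, and builds the dict in one zip; the unused Counter is dropped.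
import Mathlib
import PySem

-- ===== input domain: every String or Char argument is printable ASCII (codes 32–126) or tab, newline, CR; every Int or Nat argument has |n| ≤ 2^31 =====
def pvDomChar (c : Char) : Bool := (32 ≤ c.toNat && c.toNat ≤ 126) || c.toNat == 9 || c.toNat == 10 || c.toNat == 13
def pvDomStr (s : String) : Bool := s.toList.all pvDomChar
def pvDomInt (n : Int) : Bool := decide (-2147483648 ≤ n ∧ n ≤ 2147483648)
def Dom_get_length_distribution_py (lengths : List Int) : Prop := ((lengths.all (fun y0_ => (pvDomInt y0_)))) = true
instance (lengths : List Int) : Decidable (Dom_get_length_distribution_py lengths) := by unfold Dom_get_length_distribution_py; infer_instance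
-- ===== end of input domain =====

-- B replaces A's per-element if/elif bucket dispatch by staged counting passes (one cumulative count per boundary, bins = adjacent differences); return value only.
-- ===== PORT A =====
def get_length_distribution_py (lengths : List Int) : List (String × Int) :=
  let _length_counts := PySem.Dict.counter lengths
  let bins : PySem.Dict String Int := PySem.Dict.ofList
    [("0-10", 0), ("11-25", 0), ("26-50", 0), ("51-100", 0), ("101-200", 0), ("201-500", 0), ("500+", 0)]
  let bins := lengths.foldl (fun d length =>
    if length ≤ 10 then d.modify "0-10" 0 (· + 1)
    else if length ≤ 25 then d.modify "11-25" 0 (· + 1)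
    else if length ≤ 50 then d.modify "26-50" 0 (· + 1)
    else if length ≤ 100 then d.modify "51-100" 0 (· + 1)
    else if length ≤ 200 then d.modify "101-200" 0 (· + 1)
    else if length ≤ 500 then d.modify "201-500" 0 (· + 1)
    else d.modify "500+" 0 (· + 1)) bins
  bins.items

-- ===== PORT B =====
def get_length_distribution_py_alt (lengths : List Int) : List (String × Int) :=
  let boundaries : List Int := [10, 25, 50, 100, 200, 500]
  let keys : List String := ["0-10", "11-25", "26-50", "51-100", "101-200", "201-500", "500+"]
  -- sum(1 for x in lengths if x <= b) is the 0/1-sum form of countP (PySem.List.sum_map_ite_one_zero)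
  let cum : List Int := boundaries.map (fun b => (lengths.countP (fun x => decide (x ≤ b)) : Int)) ++ [PySem.List.len lengths]
  (PySem.Dict.ofList (keys.zip (((0 :: cum).zip cum).map (fun p => p.2 - p.1)))).items

-- ===== PRECONDITION & SPEC =====
def Spec_get_length_distribution_py (lengths : List Int) (out : List (String × Int)) : Prop := out = get_length_distribution_py_alt lengths
instance (lengths : List Int) (out : List (String × Int)) : Decidable (Spec_get_length_distribution_py lengths out) := by unfold Spec_get_length_distribution_py; infer_instance

-- ===== CLAIM (what is proved, stated in full; the proofs are below) =====
def Claim_equal_get_length_distribution_py : Prop := ∀ (lengths : List Int), Dom_get_length_distribution_py lengths → Spec_get_length_distribution_py lengths (get_length_distribution_py lengths)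

-- ===== LEMMAS AND PROOFS =====

-- Invariant of A's loop: from the seven fixed keys with arbitrary counts, the fold
-- adds to each key the number of elements falling in its range.
lemma pvA_inv (L : List Int) (c0 c1 c2 c3 c4 c5 c6 : Int) :
    L.foldl (fun d length =>
      if length ≤ 10 then d.modify "0-10" 0 (· + 1)
      else if length ≤ 25 then d.modify "11-25" 0 (· + 1)
      else if length ≤ 50 then d.modify "26-50" 0 (· + 1)
      else if length ≤ 100 then d.modify "51-100" 0 (· + 1)
      else if length ≤ 200 then d.modify "101-200" 0 (· + 1)
      else if length ≤ 500 then d.modify "201-500" 0 (· + 1)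
      else d.modify "500+" 0 (· + 1))
      (PySem.Dict.ofList [("0-10", c0), ("11-25", c1), ("26-50", c2), ("51-100", c3), ("101-200", c4), ("201-500", c5), ("500+", c6)])
    = PySem.Dict.ofList
      [("0-10", c0 + L.countP (fun x => decide (x ≤ 10))),
       ("11-25", c1 + L.countP (fun x => decide (10 < x) && decide (x ≤ 25))),
       ("26-50", c2 + L.countP (fun x => decide (25 < x) && decide (x ≤ 50))),
       ("51-100", c3 + L.countP (fun x => decide (50 < x) && decide (x ≤ 100))),
       ("101-200", c4 + L.countP (fun x => decide (100 < x) && decide (x ≤ 200))),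
       ("201-500", c5 + L.countP (fun x => decide (200 < x) && decide (x ≤ 500))),
       ("500+", c6 + L.countP (fun x => decide (500 < x)))] := by
  induction L generalizing c0 c1 c2 c3 c4 c5 c6 with
  | nil => simp
  | cons h t ih =>
    rw [List.foldl_cons]
    by_cases h1 : h ≤ 10
    · rw [if_pos h1]
      have e : (PySem.Dict.ofList [("0-10", c0), ("11-25", c1), ("26-50", c2), ("51-100", c3), ("101-200", c4), ("201-500", c5), ("500+", c6)]).modify "0-10" 0 (· + 1)
          = PySem.Dict.ofList [("0-10", c0 + 1), ("11-25", c1), ("26-50", c2), ("51-100", c3), ("101-200", c4), ("201-500", c5), ("500+", c6)] := by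
        simp [PySem.Dict.modify, PySem.Dict.ofList, PySem.Dict.insert, PySem.Dict.getD, PySem.Dict.get?, PySem.Dict.contains, PySem.Dict.update, PySem.Dict.empty]
      rw [e, ih]
      congr 1
      simp [h1, show ¬((10:Int) < h) by omega, show ¬((25:Int) < h) by omega, show ¬((50:Int) < h) by omega, show ¬((100:Int) < h) by omega, show ¬((200:Int) < h) by omega, show ¬((500:Int) < h) by omega]
      try push_cast
      try ring
    rw [if_neg h1]
    by_cases h2 : h ≤ 25
    · rw [if_pos h2]
      have e : (PySem.Dict.ofList [("0-10", c0), ("11-25", c1), ("26-50", c2), ("51-100", c3), ("101-200", c4), ("201-500", c5), ("500+", c6)]).modify "11-25" 0 (· + 1)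
          = PySem.Dict.ofList [("0-10", c0), ("11-25", c1 + 1), ("26-50", c2), ("51-100", c3), ("101-200", c4), ("201-500", c5), ("500+", c6)] := by
        simp [PySem.Dict.modify, PySem.Dict.ofList, PySem.Dict.insert, PySem.Dict.getD, PySem.Dict.get?, PySem.Dict.contains, PySem.Dict.update, PySem.Dict.empty]
      rw [e, ih]
      congr 1
      simp [h2, show (10:Int) < h by omega, show ¬((25:Int) < h) by omega, show ¬((50:Int) < h) by omega, show ¬((100:Int) < h) by omega, show ¬((200:Int) < h) by omega, show ¬((500:Int) < h) by omega]
      try push_cast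
      try ring
    rw [if_neg h2]
    by_cases h3 : h ≤ 50
    · rw [if_pos h3]
      have e : (PySem.Dict.ofList [("0-10", c0), ("11-25", c1), ("26-50", c2), ("51-100", c3), ("101-200", c4), ("201-500", c5), ("500+", c6)]).modify "26-50" 0 (· + 1)
          = PySem.Dict.ofList [("0-10", c0), ("11-25", c1), ("26-50", c2 + 1), ("51-100", c3), ("101-200", c4), ("201-500", c5), ("500+", c6)] := by
        simp [PySem.Dict.modify, PySem.Dict.ofList, PySem.Dict.insert, PySem.Dict.getD, PySem.Dict.get?, PySem.Dict.contains, PySem.Dict.update, PySem.Dict.empty]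
      rw [e, ih]
      congr 1
      simp [h3, show (10:Int) < h by omega, show (25:Int) < h by omega, show ¬((50:Int) < h) by omega, show ¬((100:Int) < h) by omega, show ¬((200:Int) < h) by omega, show ¬((500:Int) < h) by omega]
      try push_cast
      try ring
    rw [if_neg h3]
    by_cases h4 : h ≤ 100
    · rw [if_pos h4]
      have e : (PySem.Dict.ofList [("0-10", c0), ("11-25", c1), ("26-50", c2), ("51-100", c3), ("101-200", c4), ("201-500", c5), ("500+", c6)]).modify "51-100" 0 (· + 1)
          = PySem.Dict.ofList [("0-10", c0), ("11-25", c1), ("26-50", c2), ("51-100", c3 + 1), ("101-200", c4), ("201-500", c5), ("500+", c6)] := by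
        simp [PySem.Dict.modify, PySem.Dict.ofList, PySem.Dict.insert, PySem.Dict.getD, PySem.Dict.get?, PySem.Dict.contains, PySem.Dict.update, PySem.Dict.empty]
      rw [e, ih]
      congr 1
      simp [h4, show (10:Int) < h by omega, show (25:Int) < h by omega, show (50:Int) < h by omega, show ¬((100:Int) < h) by omega, show ¬((200:Int) < h) by omega, show ¬((500:Int) < h) by omega]
      try push_cast
      try ring
    rw [if_neg h4]
    by_cases h5 : h ≤ 200
    · rw [if_pos h5]
      have e : (PySem.Dict.ofList [("0-10", c0), ("11-25", c1), ("26-50", c2), ("51-100", c3), ("101-200", c4), ("201-500", c5), ("500+", c6)]).modify "101-200" 0 (· + 1)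
          = PySem.Dict.ofList [("0-10", c0), ("11-25", c1), ("26-50", c2), ("51-100", c3), ("101-200", c4 + 1), ("201-500", c5), ("500+", c6)] := by
        simp [PySem.Dict.modify, PySem.Dict.ofList, PySem.Dict.insert, PySem.Dict.getD, PySem.Dict.get?, PySem.Dict.contains, PySem.Dict.update, PySem.Dict.empty]
      rw [e, ih]
      congr 1
      simp [h5, show (10:Int) < h by omega, show (25:Int) < h by omega, show (50:Int) < h by omega, show (100:Int) < h by omega, show ¬((200:Int) < h) by omega, show ¬((500:Int) < h) by omega]
      try push_cast
      try ring
    rw [if_neg h5]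
    by_cases h6 : h ≤ 500
    · rw [if_pos h6]
      have e : (PySem.Dict.ofList [("0-10", c0), ("11-25", c1), ("26-50", c2), ("51-100", c3), ("101-200", c4), ("201-500", c5), ("500+", c6)]).modify "201-500" 0 (· + 1)
          = PySem.Dict.ofList [("0-10", c0), ("11-25", c1), ("26-50", c2), ("51-100", c3), ("101-200", c4), ("201-500", c5 + 1), ("500+", c6)] := by
        simp [PySem.Dict.modify, PySem.Dict.ofList, PySem.Dict.insert, PySem.Dict.getD, PySem.Dict.get?, PySem.Dict.contains, PySem.Dict.update, PySem.Dict.empty]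
      rw [e, ih]
      congr 1
      simp [h6, show (10:Int) < h by omega, show (25:Int) < h by omega, show (50:Int) < h by omega, show (100:Int) < h by omega, show (200:Int) < h by omega, show ¬((500:Int) < h) by omega]
      try push_cast
      try ring
    rw [if_neg h6]
    have e : (PySem.Dict.ofList [("0-10", c0), ("11-25", c1), ("26-50", c2), ("51-100", c3), ("101-200", c4), ("201-500", c5), ("500+", c6)]).modify "500+" 0 (· + 1)
        = PySem.Dict.ofList [("0-10", c0), ("11-25", c1), ("26-50", c2), ("51-100", c3), ("101-200", c4), ("201-500", c5), ("500+", c6 + 1)] := by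
      simp [PySem.Dict.modify, PySem.Dict.ofList, PySem.Dict.insert, PySem.Dict.getD, PySem.Dict.get?, PySem.Dict.contains, PySem.Dict.update, PySem.Dict.empty]
    rw [e, ih]
    congr 1
    simp [show (10:Int) < h by omega, show (25:Int) < h by omega, show (50:Int) < h by omega, show (100:Int) < h by omega, show (200:Int) < h by omega, show (500:Int) < h by omega]
    try push_cast
    try ring

-- Adjacent difference of cumulative counts = count of the half-open range (a, b].
lemma pv_countP_sub (L : List Int) (a b : Int) (hab : a ≤ b) :
    (L.countP (fun x => decide (x ≤ b)) : Int) - (L.countP (fun x => decide (x ≤ a)) : Int)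
      = (L.countP (fun x => decide (a < x) && decide (x ≤ b)) : Int) := by
  induction L with
  | nil => simp
  | cons h t ih =>
    by_cases h1 : h ≤ a
    · simp [h1, show h ≤ b by omega, show ¬(a < h) by omega]
      omega
    · by_cases h2 : h ≤ b
      · simp [h1, h2, show a < h by omega]
        omega
      · simp [h1, h2]
        omega

-- The last bin: elements above the top boundary are the rest of the list.
lemma pv_countP_rest (L : List Int) (b : Int) :
    (L.length : Int) - (L.countP (fun x => decide (x ≤ b)) : Int)
      = (L.countP (fun x => decide (b < x)) : Int) := by
  induction L with
  | nil => simp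
  | cons h t ih =>
    by_cases h1 : h ≤ b
    · simp [h1, show ¬(b < h) by omega]
      omega
    · simp [h1, show b < h by omega]
      omega

-- ===== VERDICT (by name: the statement is the Claim_ definition above) =====
theorem get_length_distribution_py_spec : Claim_equal_get_length_distribution_py := by
  intro lengths _
  unfold Spec_get_length_distribution_py
  simp only [get_length_distribution_py, get_length_distribution_py_alt, List.map, List.zip,
    List.zipWith, List.cons_append, List.nil_append, PySem.List.len_eq]
  rw [pvA_inv, pv_countP_sub lengths 10 25 (by omega), pv_countP_sub lengths 25 50 (by omega),
      pv_countP_sub lengths 50 100 (by omega), pv_countP_sub lengths 100 200 (by omega),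
      pv_countP_sub lengths 200 500 (by omega), pv_countP_rest lengths 500]
  simp
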